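-- pv_equiv track=rewrite | github.com/MohamedFarsat/tiktok-rag | graphrag/answer_formatter.py | infer_verdict_from_evidence
-- ===== SOURCE A (Python) =====
-- from typing import Dict, Iterable, List, Optional, Set, Tuple
--
-- NOT_ALLOWED_TERMS = [
--     "we don't allow",
--     "we do not allow",
--     "not allowed",
--     "prohibited",
--     "we will remove",
--     "we'll remove",
-- ]
--
-- ALLOWED_TERMS = ["allowed", "we allow", "may be allowed", "is allowed"]
--
-- def infer_verdict_from_evidence(snippets: List[str]) -> str:
--     lowered = [snippet.lower() for snippet in snippets if snippet]
--     for snippet in lowered: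
--         if any(term in snippet for term in NOT_ALLOWED_TERMS):
--             return "NOT_ALLOWED"
--     for snippet in lowered:
--         if any(term in snippet for term in ALLOWED_TERMS):
--             return "ALLOWED"
--     return "DEPENDS"
-- ===== SOURCE B (Python) =====
-- NOT_ALLOWED_TERMS = [
--     "we don't allow",
--     "we do not allow",
--     "not allowed",
--     "prohibited",
--     "we will remove",
--     "we'll remove",
-- ]
--
-- ALLOWED_TERMS = ["allowed", "we allow", "may be allowed", "is allowed"]
--
-- def infer_verdict_from_evidence(snippets):
--     saw_allowed = False
--     for snippet in snippets:
--         if not snippet: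
--             continue
--         low = snippet.lower()
--         if any(term in low for term in NOT_ALLOWED_TERMS):
--             return "NOT_ALLOWED"
--         if any(term in low for term in ALLOWED_TERMS):
--             saw_allowed = True
--     return "ALLOWED" if saw_allowed else "DEPENDS"
-- ===== Notes on version B (the rewrite author's own statement) =====
-- stated objective: simpler
-- what changed: Replaces A's materialised lowered list plus two sequential scans with a single pass that lowers each snippet once, returns NOT_ALLOWED immediately (it has absolute priority) and tracks an ALLOWED match in one boolean flag.
import Mathlib
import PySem

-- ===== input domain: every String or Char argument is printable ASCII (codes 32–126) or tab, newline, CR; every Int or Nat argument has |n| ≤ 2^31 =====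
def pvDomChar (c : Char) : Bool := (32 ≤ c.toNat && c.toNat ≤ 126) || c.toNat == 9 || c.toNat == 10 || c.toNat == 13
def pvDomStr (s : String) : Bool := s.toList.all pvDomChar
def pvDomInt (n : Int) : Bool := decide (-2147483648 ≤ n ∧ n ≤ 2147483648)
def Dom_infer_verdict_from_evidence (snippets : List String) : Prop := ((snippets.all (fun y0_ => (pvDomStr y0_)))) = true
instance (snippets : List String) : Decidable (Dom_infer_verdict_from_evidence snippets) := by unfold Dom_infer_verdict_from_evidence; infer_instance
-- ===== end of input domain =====

-- B: one pass lowering each snippet once, early return on NOT_ALLOWED, a boolean flag for ALLOWED (objective: simpler).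
-- ===== PORT A =====
def pvNATerms : List String := ["we don't allow", "we do not allow", "not allowed", "prohibited", "we will remove", "we'll remove"]
def pvALTerms : List String := ["allowed", "we allow", "may be allowed", "is allowed"]
def pvHasTerm (terms : List String) (s : String) : Bool := terms.any (fun t => PySem.Str.isIn t s)

def infer_verdict_from_evidence (snippets : List String) : String :=
  let lowered := (snippets.filter (fun s => s ≠ "")).map PySem.Str.lower
  if lowered.any (fun s => pvHasTerm pvNATerms s) then "NOT_ALLOWED"
  else if lowered.any (fun s => pvHasTerm pvALTerms s) then "ALLOWED"
  else "DEPENDS"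

-- ===== PORT B =====
def pvGoB : List String → Bool → String
  | [], saw => if saw then "ALLOWED" else "DEPENDS"
  | s :: rest, saw =>
    if s = "" then pvGoB rest saw
    else
      let low := PySem.Str.lower s
      if pvHasTerm pvNATerms low then "NOT_ALLOWED"
      else pvGoB rest (saw || pvHasTerm pvALTerms low)

def infer_verdict_from_evidence_alt (snippets : List String) : String :=
  pvGoB snippets false

-- ===== PRECONDITION & SPEC =====
def Spec_infer_verdict_from_evidence (snippets : List String) (out : String) : Prop := out = infer_verdict_from_evidence_alt snippets
instance (snippets : List String) (out : String) : Decidable (Spec_infer_verdict_from_evidence snippets out) := by unfold Spec_infer_verdict_from_evidence; infer_instance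

-- ===== CLAIM (what is proved, stated in full; the proofs are below) =====
def Claim_equal_infer_verdict_from_evidence : Prop := ∀ (snippets : List String), Dom_infer_verdict_from_evidence snippets → Spec_infer_verdict_from_evidence snippets (infer_verdict_from_evidence snippets)

-- ===== LEMMAS AND PROOFS =====

-- ===== VERDICT (by name: the statement is the Claim_ definition above) =====
lemma pvGoB_eq (xs : List String) (saw : Bool) :
    pvGoB xs saw =
      (let lowered := (xs.filter (fun s => s ≠ "")).map PySem.Str.lower
       if lowered.any (fun s => pvHasTerm pvNATerms s) then "NOT_ALLOWED"
       else if saw || lowered.any (fun s => pvHasTerm pvALTerms s) then "ALLOWED"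
       else "DEPENDS") := by
  induction xs generalizing saw with
  | nil => cases saw <;> simp [pvGoB]
  | cons s rest ih =>
    by_cases hs : s = ""
    · simp [pvGoB, hs, ih]
    · simp only [pvGoB, hs, if_neg, List.filter_cons, List.map_cons, List.any_cons,
        decide_not, decide_eq_true_eq, ite_false]
      by_cases hna : pvHasTerm pvNATerms (PySem.Str.lower s) = true
      · simp [hna]
      · simp only [hna, ih]
        simp [hna, Bool.or_assoc]

theorem infer_verdict_from_evidence_spec : Claim_equal_infer_verdict_from_evidence := by
  intro snippets _
  unfold Spec_infer_verdict_from_evidence infer_verdict_from_evidence infer_verdict_from_evidence_alt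
  rw [pvGoB_eq]
  simp
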